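-- pv_equiv track=rewrite | github.com/derekcarnegie/15-112-Coursework | week2/lab2.py | nthEmirpsPrime
-- ===== SOURCE A (Python) =====
-- def numberLength(x):
--     n = 0
--     while x>0:
--         x=(x//10)
--         n+=1
--     return n
--
-- def isPrime(n):
--     if (n < 2):
--         return False
--     for factor in range(2,n):
--         if (n % factor == 0):
--             return False
--     return True
--
-- def flipNumber(x):
--     flippedNumber=0
--     numLength = numberLength(x)
--     if x<=11:
--         return False
--     if isPrime(x)==True:
--         for counter in range(numLength):
--             number = (x//(10**counter))%10
--             flippedNumber+=number*10**(numLength-counter-1)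
--         if isPrime(flippedNumber)==False or x == flippedNumber:
--             return False
--         return flippedNumber
--     else:
--         return False
--
-- def nthEmirpsPrime(n):
--     found = 0
--     guess = 0
--     while (found <= n):
--         guess += 1
--         if (flipNumber(guess)):
--             found += 1
--     return guess
-- ===== SOURCE B (Python) =====
-- def _isPrime(n):
--     # trial division only up to the square root
--     if n < 2:
--         return False
--     d = 2
--     while d * d <= n:
--         if n % d == 0:
--             return False
--         d += 1
--     return True
--
-- def _isEmirp(x):
--     if x <= 11 or not _isPrime(x):
--         return False
--     # reverse the decimal digits in one pass, no length computation
--     r, t = 0, x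
--     while t > 0:
--         r = r * 10 + t % 10
--         t //= 10
--     return r != x and _isPrime(r)
--
-- def nthEmirpsPrime(n):
--     found = 0
--     guess = 0
--     while found <= n:
--         guess += 1
--         if _isEmirp(guess):
--             found += 1
--     return guess
-- ===== Notes on version B (the rewrite author's own statement) =====
-- stated objective: faster
-- what changed: B keeps the same candidate scan but tests primality by trial division only up to the square root and reverses the digits in one pass (rev = rev*10 + t%10) instead of A's numberLength pass plus positional power sum.
import Mathlib
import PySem

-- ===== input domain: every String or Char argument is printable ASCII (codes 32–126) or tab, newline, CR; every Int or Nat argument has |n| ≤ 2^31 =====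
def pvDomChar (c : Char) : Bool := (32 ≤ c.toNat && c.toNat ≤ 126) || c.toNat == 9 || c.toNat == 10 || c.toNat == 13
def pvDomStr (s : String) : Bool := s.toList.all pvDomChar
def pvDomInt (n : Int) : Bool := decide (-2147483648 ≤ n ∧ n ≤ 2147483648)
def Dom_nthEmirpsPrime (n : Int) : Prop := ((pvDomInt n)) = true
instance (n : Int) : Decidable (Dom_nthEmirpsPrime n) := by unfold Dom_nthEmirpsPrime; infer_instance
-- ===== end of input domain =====

-- B replaces A's full trial division (range(2,n)) by trial division up to the square root and
-- A's two-pass digit flip (numberLength + positional powers) by a single-pass reversal loop;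
-- the scan over candidates is unchanged. Both search loops are ported with the same fuel bound
-- 2^31, which only caps iterations of the (in Lean otherwise non-terminating) unbounded search.

-- ===== PORT A =====
-- termination helper for the digit loops (cited by the ports' decreasing_by)
theorem pv_div10_lt (x : Int) (h : 0 < x) : PySem.Int.floordiv x 10 < x ∧ 0 ≤ PySem.Int.floordiv x 10 := by
  rw [PySem.Int.floordiv_eq_ediv_of_pos (by omega : (0:Int) < 10)]
  constructor
  · have h0 := Int.ediv_le_self 10 (le_of_lt h)
    rcases lt_or_eq_of_le h0 with h1 | h1
    · exact h1
    · exfalso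
      have h2 : x / 10 * 10 ≤ x := Int.ediv_mul_le x (by omega)
      omega
  · exact Int.ediv_nonneg (by omega) (by omega)

def pvNumberLength (x : Int) : Int :=
  if h : 0 < x then pvNumberLength (PySem.Int.floordiv x 10) + 1 else 0
termination_by x.toNat
decreasing_by have := pv_div10_lt x h; omega

def pvIsPrimeA (n : Int) : Bool :=
  if n < 2 then false
  else !((PySem.List.pyRange 2 n 1).any (fun f => PySem.Int.mod n f == 0))

def pvFlipNumberA (x : Int) : Int :=
  let numLength := pvNumberLength x
  if x ≤ 11 then 0
  else if pvIsPrimeA x = true then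
    let flipped := (PySem.List.pyRange 0 numLength 1).foldl
      (fun acc c =>
        acc + PySem.Int.mod (PySem.Int.floordiv x ((10:Int) ^ c.toNat)) 10
                * (10:Int) ^ (numLength - c - 1).toNat) 0
    if pvIsPrimeA flipped = false ∨ x = flipped then 0 else flipped
  else 0

def pvLoopA (fuel : Nat) (n found guess : Int) : Int :=
  match fuel with
  | 0 => guess
  | fuel + 1 =>
    if found ≤ n then
      let guess' := guess + 1
      if pvFlipNumberA guess' ≠ 0 then pvLoopA fuel n (found + 1) guess'
      else pvLoopA fuel n found guess'
    else guess

def nthEmirpsPrime (n : Int) : Int := pvLoopA 2147483648 n 0 0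

-- ===== PORT B =====
def pvIsPrimeLoopB (n d : Int) : Bool :=
  if h : d * d ≤ n then
    (if PySem.Int.mod n d = 0 then false else pvIsPrimeLoopB n (d + 1))
  else true
termination_by (n + 1 - d).toNat
decreasing_by
  have hd : d ≤ n := by nlinarith
  omega

def pvIsPrimeB (n : Int) : Bool := if n < 2 then false else pvIsPrimeLoopB n 2

def pvRevLoop (r t : Int) : Int :=
  if h : 0 < t then pvRevLoop (r * 10 + PySem.Int.mod t 10) (PySem.Int.floordiv t 10)
  else r
termination_by t.toNat
decreasing_by have := pv_div10_lt t h; omega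

def pvIsEmirpB (x : Int) : Bool :=
  if x ≤ 11 ∨ pvIsPrimeB x = false then false
  else
    let r := pvRevLoop 0 x
    decide (r ≠ x) && pvIsPrimeB r

def pvLoopB (fuel : Nat) (n found guess : Int) : Int :=
  match fuel with
  | 0 => guess
  | fuel + 1 =>
    if found ≤ n then
      let guess' := guess + 1
      if pvIsEmirpB guess' then pvLoopB fuel n (found + 1) guess'
      else pvLoopB fuel n found guess'
    else guess

def nthEmirpsPrime_alt (n : Int) : Int := pvLoopB 2147483648 n 0 0

-- ===== PRECONDITION & SPEC =====
def Spec_nthEmirpsPrime (n : Int) (out : Int) : Prop := out = nthEmirpsPrime_alt n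
instance (n : Int) (out : Int) : Decidable (Spec_nthEmirpsPrime n out) := by unfold Spec_nthEmirpsPrime; infer_instance

-- ===== CLAIM (what is proved, stated in full; the proofs are below) =====
def Claim_equal_nthEmirpsPrime : Prop := ∀ (n : Int), Dom_nthEmirpsPrime n → Spec_nthEmirpsPrime n (nthEmirpsPrime n)

-- ===== LEMMAS AND PROOFS =====

theorem pvIsPrimeLoopB_iff (n d : Int) :
    0 < d → (pvIsPrimeLoopB n d = true ↔ ∀ f : Int, d ≤ f → f * f ≤ n → PySem.Int.mod n f ≠ 0) := by
  fun_induction pvIsPrimeLoopB n d with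
  | case1 d h hmod =>
    intro hd
    simp only [Bool.false_eq_true, false_iff]
    intro hall
    exact hall d (le_refl d) h hmod
  | case2 d h hmod ih =>
    intro hd
    rw [ih (by omega)]
    constructor
    · intro hall f hf hff
      rcases eq_or_lt_of_le hf with rfl | hlt
      · exact hmod
      · exact hall f (by omega) hff
    · intro hall f hf hff
      exact hall f (by omega) hff
  | case3 d h =>
    intro hd
    simp only [true_iff]
    intro f hf hff
    exfalso
    have : d * d ≤ f * f := by nlinarith
    omega
theorem pvIsPrimeA_iff (n : Int) (h : ¬ n < 2) :
    pvIsPrimeA n = true ↔ ∀ f : Int, 2 ≤ f → f < n → PySem.Int.mod n f ≠ 0 := by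
  simp only [pvIsPrimeA, if_neg h, Bool.not_eq_eq_eq_not, Bool.not_true, List.any_eq_false,
    PySem.List.mem_pyRange_one, beq_iff_eq]
  constructor
  · intro hall f h2 hlt; exact hall f ⟨h2, hlt⟩
  · intro hall f hf; exact hall f hf.1 hf.2

theorem pvPrimeA_two_le (n : Int) (h : pvIsPrimeA n = true) : 2 ≤ n := by
  by_contra hn
  rw [pvIsPrimeA, if_pos (by omega)] at h
  exact Bool.false_ne_true h

theorem pv_divisor_bridge (n : Int) (h2 : 2 ≤ n) :
    (∀ f : Int, 2 ≤ f → f < n → PySem.Int.mod n f ≠ 0) ↔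
    (∀ f : Int, 2 ≤ f → f * f ≤ n → PySem.Int.mod n f ≠ 0) := by
  constructor
  · intro hall f hf hff
    exact hall f hf (by nlinarith)
  · intro hall f hf hlt hmod
    have hdvd : f ∣ n := (PySem.Int.mod_eq_zero_iff_dvd n f).mp hmod
    obtain ⟨e, he⟩ := hdvd
    have he2 : 2 ≤ e := by
      rcases lt_trichotomy e 1 with h1 | h1 | h1
      · nlinarith
      · rw [h1, mul_one] at he; omega
      · omega
    have hedvd : e ∣ n := ⟨f, by rw [he]; ring⟩
    by_cases hc : f * f ≤ n
    · exact hall f hf hc hmod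
    · have hee : e * e ≤ n := by nlinarith
      exact hall e he2 hee ((PySem.Int.mod_eq_zero_iff_dvd n e).mpr hedvd)

theorem pvPrime_eq (n : Int) : pvIsPrimeA n = pvIsPrimeB n := by
  by_cases h : n < 2
  · rw [pvIsPrimeA, if_pos h, pvIsPrimeB, if_pos h]
  · rw [pvIsPrimeB, if_neg h]
    have ha := pvIsPrimeA_iff n h
    have hb := pvIsPrimeLoopB_iff n 2 (by omega)
    have hbr := pv_divisor_bridge n (by omega)
    apply Bool.eq_iff_iff.mpr
    rw [ha, hb]
    exact hbr

theorem pvNumberLength_nonneg (x : Int) : 0 ≤ pvNumberLength x := by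
  fun_induction pvNumberLength x <;> omega

theorem pvNumberLength_pos (x : Int) (h : 0 < x) :
    pvNumberLength x = pvNumberLength (PySem.Int.floordiv x 10) + 1 := by
  rw [pvNumberLength, dif_pos h]

theorem pvRevLoop_pos (r t : Int) (h : 0 < t) :
    pvRevLoop r t = pvRevLoop (r * 10 + PySem.Int.mod t 10) (PySem.Int.floordiv t 10) := by
  rw [pvRevLoop, dif_pos h]

theorem pvRevLoop_nonpos (r t : Int) (h : ¬ 0 < t) : pvRevLoop r t = r := by
  rw [pvRevLoop, dif_neg h]

theorem pvRevLoop_shift : ∀ (k : Nat) (t : Int), t.toNat = k → ∀ r : Int,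
    pvRevLoop r t = r * 10 ^ (pvNumberLength t).toNat + pvRevLoop 0 t := by
  intro k
  induction k using Nat.strong_induction_on with
  | _ k ih =>
    intro t hk r
    by_cases h : 0 < t
    · have hd := pv_div10_lt t h
      have hrec := pvNumberLength_pos t h
      have hnn := pvNumberLength_nonneg (PySem.Int.floordiv t 10)
      have iht := ih (PySem.Int.floordiv t 10).toNat (by omega) (PySem.Int.floordiv t 10) rfl
      rw [pvRevLoop_pos r t h, pvRevLoop_pos 0 t h,
        iht (r * 10 + PySem.Int.mod t 10), iht (0 * 10 + PySem.Int.mod t 10), hrec]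
      have hto : (pvNumberLength (PySem.Int.floordiv t 10) + 1).toNat
          = (pvNumberLength (PySem.Int.floordiv t 10)).toNat + 1 := by omega
      rw [hto]
      ring
    · rw [pvRevLoop_nonpos r t h, pvRevLoop_nonpos 0 t h, pvNumberLength, dif_neg h]
      simp

theorem pvFlip_eq_rev : ∀ (k : Nat) (x : Int), x.toNat = k →
    (PySem.List.pyRange 0 (pvNumberLength x) 1).foldl
      (fun acc c => acc + PySem.Int.mod (PySem.Int.floordiv x ((10:Int) ^ c.toNat)) 10
          * (10:Int) ^ (pvNumberLength x - c - 1).toNat) 0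
    = pvRevLoop 0 x := by
  intro k
  induction k using Nat.strong_induction_on with
  | _ k ih =>
    intro x hk
    by_cases h : 0 < x
    · have hd := pv_div10_lt x h
      have hrec := pvNumberLength_pos x h
      have hnn := pvNumberLength_nonneg (PySem.Int.floordiv x 10)
      have hLpos : (0:Int) < pvNumberLength x := by omega
      have iht := ih (PySem.Int.floordiv x 10).toNat (by omega) (PySem.Int.floordiv x 10) rfl
      rw [PySem.List.foldl_add] at iht ⊢
      rw [PySem.List.pyRange_one_cons hLpos, List.map_cons, List.sum_cons]
      rw [show ((0:Int)+1) = 1 from by norm_num]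
      rw [PySem.List.pyRange_one 1 (pvNumberLength x)] at ⊢
      rw [PySem.List.pyRange_one 0 (pvNumberLength (PySem.Int.floordiv x 10))] at iht
      simp only [List.map_map, Function.comp_def] at iht ⊢
      rw [show ((pvNumberLength x - 1).toNat)
            = ((pvNumberLength (PySem.Int.floordiv x 10) - 0).toNat) from by omega]
      have hmapeq : ∀ kk : Nat,
          PySem.Int.mod (PySem.Int.floordiv x ((10:Int) ^ ((1:Int) + (kk:Int)).toNat)) 10
              * (10:Int) ^ ((pvNumberLength x - (1 + (kk:Int)) - 1).toNat)
          = PySem.Int.mod (PySem.Int.floordiv (PySem.Int.floordiv x 10) ((10:Int) ^ ((0:Int) + (kk:Int)).toNat)) 10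
              * (10:Int) ^ ((pvNumberLength (PySem.Int.floordiv x 10) - (0 + (kk:Int)) - 1).toNat) := by
        intro kk
        have e1 : ((1:Int) + (kk:Int)).toNat = kk + 1 := by omega
        have e2 : ((0:Int) + (kk:Int)).toNat = kk := by omega
        have e3 : (pvNumberLength x - (1 + (kk:Int)) - 1).toNat
            = (pvNumberLength (PySem.Int.floordiv x 10) - (0 + (kk:Int)) - 1).toNat := by omega
        rw [e1, e2, e3]
        congr 2
        rw [PySem.Int.floordiv_eq_ediv_of_pos (by positivity : (0:Int) < 10 ^ (kk+1)),
          PySem.Int.floordiv_eq_ediv_of_pos (by positivity : (0:Int) < 10 ^ kk),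
          PySem.Int.floordiv_eq_ediv_of_pos (by norm_num : (0:Int) < 10),
          Int.ediv_ediv_of_nonneg (by norm_num : (0:Int) ≤ 10)]
        congr 1
        rw [pow_succ']
      simp only [hmapeq]
      rw [pvRevLoop_pos 0 x h, pvRevLoop_shift (PySem.Int.floordiv x 10).toNat _ rfl, ← iht]
      have hg0 : PySem.Int.floordiv x ((10:Int) ^ ((0:Int)).toNat) = x := by
        rw [show ((0:Int)).toNat = 0 from rfl, pow_zero,
          PySem.Int.floordiv_eq_ediv_of_pos (by norm_num : (0:Int) < 1), Int.ediv_one]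
      rw [hg0]
      rw [show ((pvNumberLength x - 0 - 1).toNat)
            = ((pvNumberLength (PySem.Int.floordiv x 10)).toNat) from by omega]
      ring
    · have hL : pvNumberLength x = 0 := by rw [pvNumberLength, dif_neg h]
      rw [hL, PySem.List.pyRange_one_eq_nil (le_refl 0), List.foldl_nil,
        pvRevLoop_nonpos 0 x h]

theorem pvPred_eq (g : Int) : (pvFlipNumberA g ≠ 0) ↔ (pvIsEmirpB g = true) := by
  have hflip := pvFlip_eq_rev g.toNat g rfl
  simp only [pvFlipNumberA, pvIsEmirpB]
  rw [hflip, ← pvPrime_eq g, ← pvPrime_eq (pvRevLoop 0 g)]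
  by_cases h11 : g ≤ 11
  · simp [h11]
  · by_cases hA : pvIsPrimeA g = true
    · rw [if_neg h11, if_pos hA,
        if_neg (show ¬(g ≤ 11 ∨ pvIsPrimeA g = false) from by simp [h11, hA])]
      by_cases hrp : pvIsPrimeA (pvRevLoop 0 g) = true
      · by_cases heq : g = pvRevLoop 0 g
        · rw [if_pos (Or.inr heq), ← heq]
          simp
        · rw [if_neg (show ¬(pvIsPrimeA (pvRevLoop 0 g) = false ∨ g = pvRevLoop 0 g) from by
            simp [hrp, heq])]
          have hr2 : 2 ≤ pvRevLoop 0 g := pvPrimeA_two_le _ hrp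
          simp [hrp, Ne.symm heq]
          omega
      · have hrp' : pvIsPrimeA (pvRevLoop 0 g) = false := by simpa using hrp
        rw [if_pos (Or.inl hrp')]
        simp [hrp']
    · have hA' : pvIsPrimeA g = false := by simpa using hA
      simp [h11, hA']

theorem pvLoops_eq (fuel : Nat) : ∀ n found guess : Int,
    pvLoopA fuel n found guess = pvLoopB fuel n found guess := by
  induction fuel with
  | zero => intro n found guess; rfl
  | succ f ih =>
    intro n found guess
    simp only [pvLoopA, pvLoopB]
    by_cases h : found ≤ n
    · rw [if_pos h, if_pos h]
      have hp := pvPred_eq (guess + 1)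
      by_cases hf : pvFlipNumberA (guess + 1) ≠ 0
      · rw [if_pos hf, if_pos (hp.mp hf)]
        exact ih n (found + 1) (guess + 1)
      · rw [if_neg hf, if_neg (fun hh => hf (hp.mpr hh))]
        exact ih n found (guess + 1)
    · rw [if_neg h, if_neg h]

-- ===== VERDICT (by name: the statement is the Claim_ definition above) =====
theorem nthEmirpsPrime_spec : Claim_equal_nthEmirpsPrime := by
  intro n _
  show nthEmirpsPrime n = nthEmirpsPrime_alt n
  exact pvLoops_eq 2147483648 n 0 0
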